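-- pv_equiv track=rewrite | github.com/gacheiro/beecrowd | sol/ad-hoc/2928 - Cruzando Lagos.py | thin_ice
-- ===== SOURCE A (Python) =====
-- def thin_ice(ice):
--     length = 0
--     for i in ice:
--         if i.startswith('.'):
--             length += 1
--         elif length:
--             yield length
--             length = 0
--     if length:
--         yield length
-- ===== SOURCE B (Python) =====
-- def thin_ice(ice):
--     mask = ''.join('#' if s.startswith('.') else ' ' for s in ice)
--     for run in mask.split():
--         yield len(run)
-- ===== Notes on version B (the rewrite author's own statement) =====
-- stated objective: alternative
-- what changed: Instead of a single pass with a run-length counter, B first reduces the list to a mask string of '#'/' ' marks and then reads off the run lengths as the lengths of the words of mask.split().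
import Mathlib
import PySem

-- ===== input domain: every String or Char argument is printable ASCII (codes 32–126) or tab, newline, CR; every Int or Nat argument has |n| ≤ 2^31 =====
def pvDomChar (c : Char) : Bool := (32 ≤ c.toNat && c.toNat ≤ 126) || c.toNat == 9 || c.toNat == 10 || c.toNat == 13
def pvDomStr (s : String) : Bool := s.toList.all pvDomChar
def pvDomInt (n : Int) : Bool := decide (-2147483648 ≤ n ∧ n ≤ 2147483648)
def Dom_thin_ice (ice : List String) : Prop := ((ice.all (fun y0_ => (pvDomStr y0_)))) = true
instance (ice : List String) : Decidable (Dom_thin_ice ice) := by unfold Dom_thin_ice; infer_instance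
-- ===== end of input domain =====

-- B replaces A's single-pass run counter by two staged passes: it renders the list into a
-- mask string of '#'/' ' marks and reads the run lengths off mask.split(); objective: alternative.

-- ===== PORT A =====
-- the for-loop over ice with the running counter `length` and the list of yielded values
def thinIceLoopA (length : Int) (acc : List Int) : List String → List Int
  | [] => if length ≠ 0 then acc ++ [length] else acc
  | i :: rest =>
    if PySem.Str.startswith i "." then thinIceLoopA (length + 1) acc rest
    else if length ≠ 0 then thinIceLoopA 0 (acc ++ [length]) rest
    else thinIceLoopA length acc rest

def thin_ice (ice : List String) : List Int := thinIceLoopA 0 [] ice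

-- ===== PORT B =====
-- mask = ''.join('#' if s.startswith('.') else ' ' for s in ice); yield len(run) for run in mask.split()
def thin_ice_alt (ice : List String) : List Int :=
  let mask := PySem.Str.join "" (ice.map fun s => if PySem.Str.startswith s "." then "#" else " ")
  (PySem.Str.split₀ mask).map (fun run => PySem.Str.len run)

-- ===== PRECONDITION & SPEC =====
def Spec_thin_ice (ice : List String) (out : List Int) : Prop := out = thin_ice_alt ice
instance (ice : List String) (out : List Int) : Decidable (Spec_thin_ice ice out) := by unfold Spec_thin_ice; infer_instance

-- ===== CLAIM (what is proved, stated in full; the proofs are below) =====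
def Claim_equal_thin_ice : Prop := ∀ (ice : List String), Dom_thin_ice ice → Spec_thin_ice ice (thin_ice ice)

-- ===== LEMMAS AND PROOFS =====

-- the mask's characters, one per input string
def thinIceMark (s : String) : Char := if PySem.Str.startswith s "." then '#' else ' '

theorem nil_ic (x : List Char) (xs : List (List Char)) :
    ([]:List Char).intercalate (x::xs) = x ++ ([]:List Char).intercalate xs := by
  cases xs <;> simp [List.intercalate]

theorem mask_toList (ice : List String) :
    (PySem.Str.join "" (ice.map fun s => if PySem.Str.startswith s "." then "#" else " ")).toList
      = ice.map thinIceMark := by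
  simp only [PySem.Str.join, PySem.Chars.join]
  induction ice with
  | nil => rfl
  | cons s rest ih =>
    simp only [List.map_cons, List.map_map, String.toList_ofList, String.toList_empty] at ih ⊢
    rw [nil_ic, ih]
    by_cases h : PySem.Chars.startswith s.toList [Char.ofNat 46] <;> simp [h, thinIceMark]

-- the run-length counter of A simulates split₀.go on the mask characters
theorem loopA_eq_go (ice : List String) :
    ∀ (cur : List Char) (acc : List (List Char)),
      thinIceLoopA (cur.length : Int) (acc.reverse.map (fun w => (w.length : Int))) ice
        = (PySem.Chars.split₀.go (ice.map thinIceMark) cur acc).map (fun w => (w.length : Int)) := by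
  induction ice with
  | nil =>
    intro cur acc
    simp only [List.map_nil, PySem.Chars.split₀.go, thinIceLoopA]
    by_cases hcur : cur = []
    · subst hcur; simp
    · have : cur.isEmpty = false := by simpa [List.isEmpty_iff] using hcur
      have hlen : ((cur.length : Int)) ≠ 0 := by
        have : cur.length ≠ 0 := by simpa [List.length_eq_zero_iff] using hcur
        omega
      simp [this, hcur]
  | cons s rest ih =>
    intro cur acc
    by_cases hs : PySem.Str.startswith s "." = true
    · have hmark : thinIceMark s = '#' := by simp only [thinIceMark, hs, if_pos]
      simp only [List.map_cons, hmark, PySem.Chars.split₀.go, thinIceLoopA, hs, if_pos]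
      have hsp : PySem.Chars.isspace '#' = false := by decide
      simp only [hsp, Bool.false_eq_true, if_false]
      have := ih ('#' :: cur) acc
      simpa [Int.add_comm] using this
    · have hs' : PySem.Str.startswith s "." = false := by simpa using hs
      have hmark : thinIceMark s = ' ' := by simp only [thinIceMark, hs', Bool.false_eq_true, if_false]
      have hsp : PySem.Chars.isspace ' ' = true := by decide
      simp only [List.map_cons, hmark, PySem.Chars.split₀.go, thinIceLoopA, hs',
        Bool.false_eq_true, if_false, hsp, if_pos]
      by_cases hcur : cur = []
      · subst hcur
        simp only [List.isEmpty_nil, if_pos, List.length_nil, Int.natCast_zero, ne_eq,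
          not_true_eq_false, if_false]
        exact ih [] acc
      · have hne : cur.isEmpty = false := by simpa [List.isEmpty_iff] using hcur
        have hlen : ((cur.length : Int)) ≠ 0 := by
          have : cur.length ≠ 0 := by simpa [List.length_eq_zero_iff] using hcur
          omega
        simp only [hne, Bool.false_eq_true, if_false, hlen, ne_eq, not_false_eq_true, if_pos]
        have := ih [] (cur.reverse :: acc)
        simpa using this

-- ===== VERDICT (by name: the statement is the Claim_ definition above) =====
theorem thin_ice_spec : Claim_equal_thin_ice := by
  intro ice _
  unfold Spec_thin_ice thin_ice thin_ice_alt
  simp only [PySem.Str.split₀, List.map_map]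
  have hmask := mask_toList ice
  rw [hmask]
  unfold PySem.Chars.split₀
  have := loopA_eq_go ice [] []
  simp only [List.length_nil, Int.natCast_zero, List.reverse_nil, List.map_nil] at this
  rw [this]
  congr 1
  funext w
  simp [PySem.Str.len, Function.comp]
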